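-- pv_equiv track=rewrite | github.com/vedaloliver/Bioinformatics---Pattern-Recognition- | Pattern_recognition.py | naive_with_reverse
-- ===== SOURCE A (Python) =====
-- pattern = 'AGGAGGTT'
--
-- def reversecomplement(read):
--     # The user may not be aware if the reads are going to be in either
--     # normal or cDNA, this covers both bases (pardon the pun)
--     complement = {'A': 'T', 'C': 'G', 'G': 'C', 'T': 'A'}
--     t = ''
--     for base in read:
--         t = complement[base] + t
--     return t
--
-- def naive_with_reverse(p, p_rev, t):
--     # to determine if the pattern being looked for is in the full strand
--     # functionality to also look for reverse complement variation
--     # this functionality was extended to remove complement variation if the pattern and reverse complement was the same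
--     occurrences = []
--     # naive algorithm implementation
--     for i in range(len(t) - len(p) + 1):
--         match = True
--         for j in range(len(p)):
--             if not t[i+j] == p[j]:
--                 match = False
--         if match:
--             occurrences.append(i)
--     # naive algorithm applied to the reverse complement; not utilising if pattern == rev_complement
--     if pattern != (reversecomplement(pattern)):
--         for i in range(len(t) - len(p_rev) + 1):
--             match = True
--             for j in range(len(p_rev)):
--                 if not t[i+j] == p_rev[j]:
--                     match = False
--             if match:
--                 occurrences.append(i)
--
--     return occurrences, len(occurrences)
-- ===== SOURCE B (Python) =====
-- def naive_with_reverse(p, p_rev, t):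
--     # find()-based scan: jump from occurrence to occurrence instead of
--     # re-checking every alignment character by character
--     occurrences = []
--     for q in (p, p_rev):
--         i = t.find(q)
--         while i != -1:
--             occurrences.append(i)
--             i = t.find(q, i + 1)
--     return occurrences, len(occurrences)
-- ===== Notes on version B (the rewrite author's own statement) =====
-- stated objective: faster
-- what changed: B replaces A's alignment-by-alignment naive scan (checking every character of every window, with no early break) by a str.find-driven loop that jumps directly from one occurrence to the next for each of the two patterns.
import Mathlib
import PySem

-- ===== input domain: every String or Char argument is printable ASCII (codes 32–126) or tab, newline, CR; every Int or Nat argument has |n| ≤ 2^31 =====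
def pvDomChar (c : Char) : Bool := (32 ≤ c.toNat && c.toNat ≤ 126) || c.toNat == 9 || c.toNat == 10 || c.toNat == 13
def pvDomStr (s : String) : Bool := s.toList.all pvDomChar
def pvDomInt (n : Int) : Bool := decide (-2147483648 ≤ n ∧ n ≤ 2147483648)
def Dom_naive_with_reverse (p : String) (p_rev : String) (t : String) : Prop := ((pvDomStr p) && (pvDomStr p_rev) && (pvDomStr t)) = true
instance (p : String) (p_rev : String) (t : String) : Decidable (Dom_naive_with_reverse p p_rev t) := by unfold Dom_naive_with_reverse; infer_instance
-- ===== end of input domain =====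

-- B replaces A's quadratic alignment-by-alignment scan with a t.find()-driven jump
-- from occurrence to occurrence for each of the two patterns (objective: faster).

-- ===== PORT A =====
-- module constant: pattern = 'AGGAGGTT'
def pvPattern : List Char := ['A', 'G', 'G', 'A', 'G', 'G', 'T', 'T']

-- complement = {'A': 'T', 'C': 'G', 'G': 'C', 'T': 'A'}
def pvComplement : PySem.Dict Char Char :=
  PySem.Dict.ofList [('A', 'T'), ('C', 'G'), ('G', 'C'), ('T', 'A')]

-- reversecomplement(read); complement[base] would raise KeyError off 'ACGT', but A only
-- ever calls it on the constant pattern, where get? is always some (the '?' default is unreachable)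
def pvReverseComplement (read : List Char) : List Char :=
  read.foldl (fun t base => ((pvComplement.get? base).getD '?') :: t) []

-- one naive scan loop of A: for i in range(len(t)-len(q)+1): inner char-by-char check, append i on match
def pvScanA (q tc : List Char) (occ : List Int) : List Int :=
  (PySem.List.pyRange 0 ((tc.length : Int) - (q.length : Int) + 1) 1).foldl
    (fun occ i =>
      let m := (PySem.List.pyRange 0 ((q.length : Int)) 1).foldl
        (fun m j => if !(PySem.List.pyGetD tc (i + j) ' ' == PySem.List.pyGetD q j ' ') then false else m)
        true
      if m then occ ++ [i] else occ)
    occ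

def naive_with_reverse (p : String) (p_rev : String) (t : String) : List Int × Int :=
  let tc := t.toList
  let occ := pvScanA p.toList tc []
  let occ := if pvPattern ≠ pvReverseComplement pvPattern then pvScanA p_rev.toList tc occ else occ
  (occ, occ.length)

-- ===== PORT B =====
-- while i != -1: occurrences.append(i); i = t.find(q, i+1)   (fuel bounds the loop; it never runs out:
-- found indices strictly increase and stay ≤ len(t), so at most len(t)+1 appends happen)
def pvFindLoop (tc q : List Char) : Nat → Int → List Int → List Int
  | 0, _, occ => occ
  | fuel + 1, i, occ =>
      if i == -1 then occ
      else pvFindLoop tc q fuel (PySem.Chars.findFrom tc q (i + 1) none) (occ ++ [i])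

def naive_with_reverse_alt (p : String) (p_rev : String) (t : String) : List Int × Int :=
  let tc := t.toList
  let occ := [p.toList, p_rev.toList].foldl
    (fun occ q => pvFindLoop tc q (tc.length + 1) (PySem.Chars.find tc q) occ) []
  (occ, occ.length)

-- ===== PRECONDITION & SPEC =====
def Spec_naive_with_reverse (p : String) (p_rev : String) (t : String) (out : List Int × Int) : Prop := out = naive_with_reverse_alt p p_rev t
instance (p : String) (p_rev : String) (t : String) (out : List Int × Int) : Decidable (Spec_naive_with_reverse p p_rev t out) := by unfold Spec_naive_with_reverse; infer_instance

-- ===== CLAIM (what is proved, stated in full; the proofs are below) =====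
def Claim_equal_naive_with_reverse : Prop := ∀ (p : String) (p_rev : String) (t : String), Dom_naive_with_reverse p p_rev t → Spec_naive_with_reverse p p_rev t (naive_with_reverse p p_rev t)

-- ===== LEMMAS AND PROOFS =====

-- the common characterisation: all starting positions (in order, from s on) where q occurs in tc
def pvOcc (q tc : List Char) (s : Nat) : List Int :=
  ((List.range' s (tc.length + 1 - s)).filter (fun i => decide (q <+: tc.drop i))).map
    (fun i => Int.ofNat i)

lemma pvPrefix_iff (q tc : List Char) (i : Nat) (h : i + q.length ≤ tc.length) :
    q <+: tc.drop i ↔ ∀ j, j < q.length → tc.getD (i + j) ' ' = q.getD j ' ' := by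
  constructor
  · intro hpre j hj
    have hg := hpre.getElem hj
    rw [List.getD_eq_getElem _ _ (show i + j < tc.length by omega), List.getD_eq_getElem _ _ hj]
    rw [hg]
    simp [List.getElem_drop]
  · intro hp
    rw [List.prefix_iff_eq_take]
    apply List.ext_getElem (by simp [List.length_take, List.length_drop]; omega)
    intro j h1 h2
    have := hp j h1
    rw [List.getD_eq_getElem _ _ (show i + j < tc.length by omega), List.getD_eq_getElem _ _ h1] at this
    simp only [List.getElem_take, List.getElem_drop]
    rw [← this]

lemma pvFoldAnd (P : Int → Bool) (l : List Int) (b : Bool) :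
    l.foldl (fun m j => if !(P j) then false else m) b = (b && l.all P) := by
  induction l generalizing b with
  | nil => simp
  | cons a l ih =>
    simp only [List.foldl_cons, List.all_cons, ih]
    cases h : P a <;> simp

lemma pvInner_eq (q tc : List Char) (i : Nat) (h : i + q.length ≤ tc.length) :
    (PySem.List.pyRange 0 ((q.length : Int)) 1).foldl
        (fun m j => if !(PySem.List.pyGetD tc ((i : Int) + j) ' ' == PySem.List.pyGetD q j ' ') then false else m)
        true
      = decide (q <+: tc.drop i) := by
  rw [pvFoldAnd, Bool.true_and, Bool.eq_iff_iff]
  simp only [PySem.List.pyRange_zero_natCast, List.all_map, List.all_eq_true, List.mem_range,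
    decide_eq_true_eq, pvPrefix_iff q tc i h, Function.comp_apply]
  constructor
  · intro hall j hj
    have := hall j hj
    rw [show ((i : Int) + (j : Int)) = ((i + j : Nat) : Int) by push_cast; ring,
        PySem.List.pyGetD_natCast, PySem.List.pyGetD_natCast] at this
    exact beq_iff_eq.mp this
  · intro hall j hj
    rw [show ((i : Int) + (j : Int)) = ((i + j : Nat) : Int) by push_cast; ring,
        PySem.List.pyGetD_natCast, PySem.List.pyGetD_natCast]
    exact beq_iff_eq.mpr (hall j hj)

lemma pvScanA_eq (q tc : List Char) (occ : List Int) :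
    pvScanA q tc occ = occ ++ pvOcc q tc 0 := by
  unfold pvScanA pvOcc
  rw [PySem.List.foldl_append_if_eq_filter]
  congr 1
  rw [Nat.sub_zero, ← List.range_eq_range']
  by_cases hlen : q.length ≤ tc.length
  · have hb : ((tc.length : Int) - (q.length : Int) + 1) = ((tc.length - q.length + 1 : Nat) : Int) := by
      push_cast [hlen]; ring
    rw [hb, PySem.List.pyRange_zero_natCast (tc.length - q.length + 1), List.filter_map]
    simp only [Function.comp_def]
    have hcongr : List.filter
        (fun k : Nat => (PySem.List.pyRange 0 ((q.length : Int)) 1).foldl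
          (fun m j => if !(PySem.List.pyGetD tc ((k : Int) + j) ' ' == PySem.List.pyGetD q j ' ') then false else m)
          true)
        (List.range (tc.length - q.length + 1))
        = List.filter (fun i => decide (q <+: tc.drop i)) (List.range (tc.length - q.length + 1)) :=
      List.filter_congr (fun i hi => by
        rw [List.mem_range] at hi
        exact pvInner_eq q tc i (by omega))
    rw [hcongr]
    have hsplit : List.range (tc.length + 1) =
        List.range (tc.length - q.length + 1) ++ List.range' (tc.length - q.length + 1) q.length := by
      rw [List.range_eq_range', List.range_eq_range',
        show List.range' (tc.length - q.length + 1) q.length = List.range' (0 + 1 * (tc.length - q.length + 1)) q.length by congr 1; omega,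
        List.range'_append]
      congr 1
      omega
    have hnil : List.filter (fun i => decide (q <+: tc.drop i)) (List.range' (tc.length - q.length + 1) q.length) = [] := by
      rw [List.filter_eq_nil_iff]
      intro a ha
      rw [List.mem_range'] at ha
      simp only [decide_eq_true_eq]
      intro hpre
      have := hpre.length_le
      simp only [List.length_drop] at this
      omega
    rw [hsplit, List.filter_append, hnil, List.append_nil]
    simp [Int.ofNat_eq_natCast]
  · have hb : ((tc.length : Int) - (q.length : Int) + 1) ≤ 0 := by omega
    rw [PySem.List.pyRange_one_eq_nil hb,
        show List.filter (fun i => decide (q <+: tc.drop i)) (List.range (tc.length + 1)) = [] by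
          rw [List.filter_eq_nil_iff]
          intro a _
          simp only [decide_eq_true_eq]
          intro hpre
          have := hpre.length_le
          simp only [List.length_drop] at this
          omega]
    simp

lemma pvFindFrom_past (tc q : List Char) (k : Nat) (hk : tc.length < k) :
    PySem.Chars.findFrom tc q (k : Int) none = -1 := by
  simp only [PySem.Chars.findFrom]
  rw [if_neg (show ¬ ((k : Int) < 0) by omega), if_pos (show (tc.length : Int) < (k : Int) by exact_mod_cast hk)]

lemma pvOcc_nil (q tc : List Char) (s : Nat) (h : ∀ i, s ≤ i → i ≤ tc.length → ¬ q <+: tc.drop i) :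
    pvOcc q tc s = [] := by
  unfold pvOcc
  rw [show List.filter (fun i => decide (q <+: tc.drop i)) (List.range' s (tc.length + 1 - s)) = [] by
    rw [List.filter_eq_nil_iff]
    intro a ha
    rw [List.mem_range'] at ha
    simp only [decide_eq_true_eq]
    exact h a (by omega) (by omega)]
  rfl

lemma pvFindLoop_eq (tc q : List Char) (fuel : Nat) : ∀ (s : Nat) (occ : List Int),
    tc.length + 1 ≤ fuel + s →
    pvFindLoop tc q fuel (PySem.Chars.findFrom tc q (s : Int) none) occ = occ ++ pvOcc q tc s := by
  induction fuel with
  | zero =>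
    intro s occ hf
    simp only [pvFindLoop]
    unfold pvOcc
    rw [show tc.length + 1 - s = 0 by omega]
    simp
  | succ fuel ih =>
    intro s occ hf
    by_cases hsle : s ≤ tc.length
    · rw [PySem.Chars.findFrom_natCast tc q s hsle]
      by_cases hfind : PySem.Chars.find (tc.drop s) q = -1
      · rw [if_pos hfind]
        simp only [pvFindLoop, if_pos (by rfl : ((-1 : Int) == -1) = true)]
        rw [pvOcc_nil q tc s (fun i hsi hile hpre => by
          rw [show tc.drop i = (tc.drop s).drop (i - s) by rw [List.drop_drop]; congr 1; omega] at hpre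
          have : PySem.Chars.isIn q (tc.drop s) = true :=
            (PySem.Chars.exists_prefix_drop_iff_isIn q (tc.drop s)).mp ⟨i - s, hpre⟩
          rw [PySem.Chars.find_eq_neg_one_iff] at hfind
          exact hfind ((PySem.Chars.isIn_iff_infix q (tc.drop s)).mp this)), List.append_nil]
      · rw [if_neg hfind]
        have hf0 : 0 ≤ PySem.Chars.find (tc.drop s) q := by
          have := PySem.Chars.neg_one_le_find (tc.drop s) q
          omega
        obtain ⟨hpre, hmin⟩ := PySem.Chars.find_spec hf0
        have hfle := PySem.Chars.find_le_length (tc.drop s) q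
        have htn : ((PySem.Chars.find (tc.drop s) q).toNat : Int) = PySem.Chars.find (tc.drop s) q :=
          Int.toNat_of_nonneg hf0
        set fN := (PySem.Chars.find (tc.drop s) q).toNat with hfN
        have hmle : s + fN ≤ tc.length := by
          simp only [List.length_drop] at hfle
          omega
        rw [show (s : Int) + PySem.Chars.find (tc.drop s) q = ((s + fN : Nat) : Int) by push_cast [htn]; ring]
        simp only [pvFindLoop]
        rw [if_neg (by simp; omega)]
        rw [show ((s + fN : Nat) : Int) + 1 = ((s + fN + 1 : Nat) : Int) by push_cast; ring,
            ih (s + fN + 1) (occ ++ [((s + fN : Nat) : Int)]) (by omega), List.append_assoc]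
        congr 1
        have hpre' : q <+: tc.drop (s + fN) := by
          rw [← List.drop_drop]
          exact hpre
        have hmin' : ∀ i, s ≤ i → i < s + fN → ¬ q <+: tc.drop i := fun i h1 h2 hp => by
          rw [show tc.drop i = (tc.drop s).drop (i - s) by rw [List.drop_drop]; congr 1; omega] at hp
          exact hmin (i - s) (by omega) hp
        unfold pvOcc
        rw [show List.range' s (tc.length + 1 - s) =
              List.range' s (fN) ++ List.range' (s + fN) (tc.length + 1 - (s + fN)) by
            rw [show List.range' (s + fN) (tc.length + 1 - (s + fN)) = List.range' (s + 1 * fN) (tc.length + 1 - (s + fN)) by congr 1; omega,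
                List.range'_append]
            congr 1
            omega,
          List.filter_append,
          show List.filter (fun i => decide (q <+: tc.drop i)) (List.range' s fN) = [] by
            rw [List.filter_eq_nil_iff]
            intro a ha
            rw [List.mem_range'] at ha
            simp only [decide_eq_true_eq]
            exact hmin' a (by omega) (by omega),
          show List.range' (s + fN) (tc.length + 1 - (s + fN)) =
              (s + fN) :: List.range' (s + fN + 1) (tc.length + 1 - (s + fN + 1)) by
            rw [show tc.length + 1 - (s + fN) = (tc.length + 1 - (s + fN + 1)) + 1 by omega,
              List.range'_succ]]
        simp [hpre']
    · rw [pvFindFrom_past tc q s (by omega)]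
      simp only [pvFindLoop, if_pos (by rfl : ((-1 : Int) == -1) = true)]
      rw [pvOcc_nil q tc s (fun i hsi hile _ => by omega), List.append_nil]

theorem pv_main (p p_rev t : String) :
    naive_with_reverse p p_rev t = naive_with_reverse_alt p p_rev t := by
  unfold naive_with_reverse naive_with_reverse_alt
  have h0 : ∀ q : List Char, PySem.Chars.find t.toList q =
      PySem.Chars.findFrom t.toList q ((0 : Nat) : Int) none := by
    intro q
    rw [show (((0 : Nat) : Int)) = (0 : Int) by norm_num, PySem.Chars.findFrom_zero]
  simp only [List.foldl_cons, List.foldl_nil]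
  rw [if_pos (by decide)]
  rw [pvScanA_eq, pvScanA_eq, h0 p.toList, h0 p_rev.toList,
      pvFindLoop_eq t.toList p.toList (t.toList.length + 1) 0 [] (by omega),
      pvFindLoop_eq t.toList p_rev.toList (t.toList.length + 1) 0 _ (by omega)]

-- ===== VERDICT (by name: the statement is the Claim_ definition above) =====
theorem naive_with_reverse_spec : Claim_equal_naive_with_reverse := by
  intro p p_rev t _
  unfold Spec_naive_with_reverse
  exact pv_main p p_rev t
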